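-- pv_equiv track=rewrite | github.com/pypi-data/pypi-mirror-366 | packages/sparc-curation-tools/sparc_curation_tools-0.7.9-py3-none-any.whl/sparc/curation/tools/helpers/file_helper.py | contains_metadata
-- ===== SOURCE A (Python) =====
-- ZINC_GRAPHICS_TYPES = ["points", "lines", "surfaces", "contours", "streamlines"]
--
-- def is_graphics_entry(entry):
--     """
--     Check if the given entry in JSON format represents a graphics entry.
--
--     Args:
--         entry (dict): The JSON entry to check.
--
--     Returns:
--         bool: True if it's a graphics entry, False otherwise.
--     """
--     if 'URL' in entry and 'Type' in entry:
--         entry_type = entry['Type']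
--         if entry_type.lower() in ZINC_GRAPHICS_TYPES:
--             return True
--
--     return False
--
-- def is_view_entry(entry):
--     """
--     Check if the given entry in JSON format represents a view entry.
--
--     Args:
--         entry (dict): The JSON entry to check.
--
--     Returns:
--         bool: True if it's a view entry, False otherwise.
--     """
--     if 'URL' in entry and 'Type' in entry:
--         entry_type = entry['Type']
--         if entry_type.lower() == "view":
--             return True
--
--     return False
--
-- def contains_metadata(json_data):
--     """
--     Check if the given JSON data contains metadata entries.
--
--     Args:
--         json_data (str): The JSON data to test.
--
--     Returns:
--         bool: True if it contains metadata, False otherwise.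
--     """
--     have_viewable_graphics = False
--     have_view_reference = False
--
--     if json_data:
--         if isinstance(json_data, list):
--             for entry in json_data:
--                 if not have_viewable_graphics and is_graphics_entry(entry):
--                     have_viewable_graphics = True
--                 if not have_view_reference and is_view_entry(entry):
--                     have_view_reference = True
--
--     return have_view_reference and have_viewable_graphics
-- ===== SOURCE B (Python) =====
-- ZINC_GRAPHICS_TYPES = ["points", "lines", "surfaces", "contours", "streamlines"]
--
--
-- def _matches(entry, types):
--     """True iff entry has a 'URL' key and its 'Type' value (lowercased) is in types."""
--     if 'URL' not in entry:
--         return False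
--     entry_type = entry.get('Type')
--     return entry_type is not None and entry_type.lower() in types
--
--
-- def contains_metadata(json_data):
--     if not json_data or not isinstance(json_data, list):
--         return False
--     return (any(_matches(entry, ["view"]) for entry in json_data)
--             and any(_matches(entry, ZINC_GRAPHICS_TYPES) for entry in json_data))
-- ===== Notes on version B (the rewrite author's own statement) =====
-- stated objective: simpler
-- what changed: Replaces the single loop maintaining two sticky flags with an early-return guard and two independent short-circuiting any() passes over one shared key/type predicate, instead of two near-duplicate entry checkers.
import Mathlib
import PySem

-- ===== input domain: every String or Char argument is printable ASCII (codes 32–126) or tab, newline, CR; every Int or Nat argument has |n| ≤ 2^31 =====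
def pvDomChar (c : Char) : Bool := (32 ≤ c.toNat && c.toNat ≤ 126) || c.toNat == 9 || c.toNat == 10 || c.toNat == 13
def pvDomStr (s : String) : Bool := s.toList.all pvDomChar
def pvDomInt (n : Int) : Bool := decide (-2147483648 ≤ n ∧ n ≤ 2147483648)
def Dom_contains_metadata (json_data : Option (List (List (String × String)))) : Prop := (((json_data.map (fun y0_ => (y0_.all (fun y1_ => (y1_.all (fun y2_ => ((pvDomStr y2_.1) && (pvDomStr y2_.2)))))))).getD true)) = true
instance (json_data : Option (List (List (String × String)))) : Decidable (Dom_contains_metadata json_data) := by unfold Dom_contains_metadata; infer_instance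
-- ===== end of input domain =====

-- B replaces A's one pass with two sticky flags by a guard plus two independent
-- short-circuiting `any` passes over one shared key/type predicate (objective: simpler).

-- ===== PORT A =====
def ZINC_GRAPHICS_TYPES : List String := ["points", "lines", "surfaces", "contours", "streamlines"]

def is_graphics_entry (entry : List (String × String)) : Bool :=
  if entry.any (fun p => p.1 == "URL") && entry.any (fun p => p.1 == "Type") then
    match entry.lookup "Type" with
    | some entry_type => ZINC_GRAPHICS_TYPES.contains (PySem.Str.lower entry_type)
    | none => false
  else false

def is_view_entry (entry : List (String × String)) : Bool :=
  if entry.any (fun p => p.1 == "URL") && entry.any (fun p => p.1 == "Type") then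
    match entry.lookup "Type" with
    | some entry_type => PySem.Str.lower entry_type == "view"
    | none => false
  else false

def contains_metadata (json_data : Option (List (List (String × String)))) : Bool :=
  let st : Bool × Bool := (false, false)   -- (have_viewable_graphics, have_view_reference)
  let st :=
    match json_data with
    | none => st
    | some l =>
      if !l.isEmpty then
        l.foldl (fun s entry =>
          (if !s.1 && is_graphics_entry entry then true else s.1,
           if !s.2 && is_view_entry entry then true else s.2)) st
      else st
  st.2 && st.1

-- ===== PORT B =====
def matches_b (entry : List (String × String)) (types : List String) : Bool :=
  if !entry.any (fun p => p.1 == "URL") then false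
  else
    match entry.lookup "Type" with
    | none => false
    | some entry_type => types.contains (PySem.Str.lower entry_type)

def contains_metadata_alt (json_data : Option (List (List (String × String)))) : Bool :=
  match json_data with
  | none => false
  | some l =>
    if l.isEmpty then false
    else l.any (fun e => matches_b e ["view"]) && l.any (fun e => matches_b e ZINC_GRAPHICS_TYPES)

-- ===== PRECONDITION & SPEC =====
def Spec_contains_metadata (json_data : Option (List (List (String × String)))) (out : Bool) : Prop := out = contains_metadata_alt json_data
instance (json_data : Option (List (List (String × String)))) (out : Bool) : Decidable (Spec_contains_metadata json_data out) := by unfold Spec_contains_metadata; infer_instance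

-- ===== CLAIM (what is proved, stated in full; the proofs are below) =====
def Claim_equal_contains_metadata : Prop := ∀ (json_data : Option (List (List (String × String)))), Dom_contains_metadata json_data → Spec_contains_metadata json_data (contains_metadata json_data)

-- ===== LEMMAS AND PROOFS =====

theorem lookup_isSome_eq_any {β : Type} (l : List (String × β)) (k : String) :
    (l.lookup k).isSome = l.any (fun p => p.1 == k) := by
  induction l with
  | nil => rfl
  | cons p t ih =>
    cases hp : k == p.1 <;> simp [List.lookup, hp, ih, BEq.comm]

-- A's sticky-flag fold computes the disjunctions of the two predicates over the list.
theorem foldl_flags (l : List (List (String × String))) (g v : Bool) :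
    l.foldl (fun s entry =>
      (if !s.1 && is_graphics_entry entry then true else s.1,
       if !s.2 && is_view_entry entry then true else s.2)) (g, v)
    = (g || l.any is_graphics_entry, v || l.any is_view_entry) := by
  induction l generalizing g v with
  | nil => simp
  | cons e t ih =>
    simp only [List.foldl_cons, List.any_cons, ih]
    congr 1 <;> cases g <;> cases v <;>
      cases is_graphics_entry e <;> cases is_view_entry e <;> simp

theorem matches_view (e : List (String × String)) :
    matches_b e ["view"] = is_view_entry e := by
  unfold matches_b is_view_entry
  have ht := lookup_isSome_eq_any e "Type"
  cases hu : e.any (fun p => p.1 == "URL") <;> cases hl : e.lookup "Type" <;>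
    simp_all [(Bool.beq_eq_decide_eq · "view")]

theorem matches_graphics (e : List (String × String)) :
    matches_b e ZINC_GRAPHICS_TYPES = is_graphics_entry e := by
  unfold matches_b is_graphics_entry
  have ht := lookup_isSome_eq_any e "Type"
  cases hu : e.any (fun p => p.1 == "URL") <;> cases hl : e.lookup "Type" <;>
    simp_all [ZINC_GRAPHICS_TYPES, ZINC_GRAPHICS_TYPES]

-- ===== VERDICT (by name: the statement is the Claim_ definition above) =====
theorem contains_metadata_spec : Claim_equal_contains_metadata := by
  intro json_data _
  unfold Spec_contains_metadata contains_metadata contains_metadata_alt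
  cases json_data with
  | none => rfl
  | some l =>
    cases l with
    | nil => rfl
    | cons e t =>
      simp only [List.isEmpty_cons, Bool.not_false, if_true, Bool.false_eq_true, if_false,
        foldl_flags]
      simp [matches_view, matches_graphics, Bool.and_comm]
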